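-- pv_equiv track=rewrite | github.com/felixrauh/conference_scheduler | src/matching_pipeline.py | build_co_preference_matrix
-- ===== SOURCE A (Python) =====
-- from typing import Dict, List, Set, Tuple, Optional, FrozenSet
--
-- def compute_co_preference_weight(
--     talk_i: str,
--     talk_j: str,
--     preferences: Dict[str, Set[str]]
-- ) -> int:
--     """
--     Compute co-preference weight between two talks.
--
--     Weight = number of participants who want BOTH talks.
--     """
--     count = 0
--     for p_id, prefs in preferences.items():
--         if talk_i in prefs and talk_j in prefs:
--             count += 1
--     return count
--
-- def build_co_preference_matrix(
--     talks: List[str],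
--     preferences: Dict[str, Set[str]]
-- ) -> Dict[Tuple[str, str], int]:
--     """
--     Build complete co-preference matrix for all talk pairs.
--
--     Returns dict mapping (talk_i, talk_j) -> weight where i < j lexicographically.
--     """
--     weights = {}
--     for i, talk_i in enumerate(talks):
--         for talk_j in talks[i+1:]:
--             # Ensure consistent ordering
--             pair = (talk_i, talk_j) if talk_i < talk_j else (talk_j, talk_i)
--             weights[pair] = compute_co_preference_weight(
--                 talk_i, talk_j, preferences)
--     return weights
-- ===== SOURCE B (Python) =====
-- def build_co_preference_matrix(talks, preferences):
--     # Count, once, for every participant, all ordered pairs (x, y) with x <= y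
--     # drawn from that participant's preference set; then each talk pair's
--     # weight is a single dictionary lookup instead of a scan over participants.
--     counts = {}
--     for prefs in preferences.values():
--         rest = sorted(prefs)
--         while rest:
--             x = rest[0]
--             for y in rest:
--                 key = (x, y)
--                 counts[key] = counts.get(key, 0) + 1
--             rest = rest[1:]
--     weights = {}
--     rest = talks
--     while rest:
--         t, rest = rest[0], rest[1:]
--         for u in rest:
--             pair = (t, u) if t < u else (u, t)
--             if pair not in weights:
--                 weights[pair] = counts.get(pair, 0)
--     return weights
-- ===== Notes on version B (the rewrite author's own statement) =====
-- stated objective: faster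
-- what changed: Instead of scanning every participant for every talk pair, B tallies once, per participant, all ordered pairs within that participant's preference set into a counter dict, so each pair's weight becomes a single lookup.
import Mathlib
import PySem

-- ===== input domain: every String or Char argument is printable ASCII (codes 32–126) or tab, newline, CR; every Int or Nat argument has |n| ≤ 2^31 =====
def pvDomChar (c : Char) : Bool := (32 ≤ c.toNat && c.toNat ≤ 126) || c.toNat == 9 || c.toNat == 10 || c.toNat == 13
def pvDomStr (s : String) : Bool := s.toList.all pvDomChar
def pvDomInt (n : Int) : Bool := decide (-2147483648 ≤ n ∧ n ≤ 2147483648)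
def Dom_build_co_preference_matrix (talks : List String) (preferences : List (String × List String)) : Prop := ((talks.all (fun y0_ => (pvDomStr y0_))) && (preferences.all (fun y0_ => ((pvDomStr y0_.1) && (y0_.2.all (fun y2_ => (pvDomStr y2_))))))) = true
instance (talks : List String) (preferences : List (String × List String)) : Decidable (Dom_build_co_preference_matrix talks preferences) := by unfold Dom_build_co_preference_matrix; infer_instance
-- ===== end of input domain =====

-- B replaces A's per-pair scan over all participants by one counter dict of the ordered
-- pairs inside each participant's preference set (objective: faster).

-- ===== PORT A =====
def compute_co_preference_weight (talk_i : String) (talk_j : String)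
    (preferences : PySem.Dict String (List String)) : Int :=
  preferences.items.foldl
    (fun count pr => if talk_i ∈ pr.2 ∧ talk_j ∈ pr.2 then count + 1 else count) 0

def build_co_preference_matrix (talks : List String) (preferences : List (String × List String)) : List (String × String × Int) :=
  let d : PySem.Dict String (List String) := PySem.Dict.ofList preferences
  let weights : PySem.Dict (String × String) Int :=
    (PySem.List.enumerate talks).foldl
      (fun w p =>
        (PySem.List.slice talks (some (p.1 + 1)) none).foldl
          (fun w talk_j =>
            w.insert (if p.2 < talk_j then (p.2, talk_j) else (talk_j, p.2))
              (compute_co_preference_weight p.2 talk_j d)) w)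
      PySem.Dict.empty
  weights.items.map (fun p => (p.1.1, p.1.2, p.2))

-- ===== PORT B =====
-- 'while rest: x = rest[0]; for y in rest: counts[(x,y)] += 1; rest = rest[1:]'
def pvBumpPairs : List String → PySem.Dict (String × String) Int → PySem.Dict (String × String) Int
  | [], c => c
  | x :: r, c =>
      pvBumpPairs r ((x :: r).foldl (fun c y => c.insert (x, y) (c.getD (x, y) 0 + 1)) c)

-- 'while rest: t, rest = rest[0], rest[1:]; for u in rest: …'
def pvWeightsLoop (counts : PySem.Dict (String × String) Int) :
    List String → PySem.Dict (String × String) Int → PySem.Dict (String × String) Int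
  | [], w => w
  | t :: r, w =>
      pvWeightsLoop counts r
        (r.foldl (fun w u =>
          let pair := if t < u then (t, u) else (u, t)
          if w.contains pair then w else w.insert pair (counts.getD pair 0)) w)

def build_co_preference_matrix_alt (talks : List String) (preferences : List (String × List String)) : List (String × String × Int) :=
  let d : PySem.Dict String (List String) := PySem.Dict.ofList preferences
  let counts : PySem.Dict (String × String) Int :=
    d.values.foldl
      (fun c prefs => pvBumpPairs (PySem.List.sorted (PySem.Set.ofList prefs) (fun z => z) false) c)
      PySem.Dict.empty
  (pvWeightsLoop counts talks PySem.Dict.empty).items.map (fun p => (p.1.1, p.1.2, p.2))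

-- ===== PRECONDITION & SPEC =====
def Spec_build_co_preference_matrix (talks : List String) (preferences : List (String × List String)) (out : List (String × String × Int)) : Prop := out = build_co_preference_matrix_alt talks preferences
instance (talks : List String) (preferences : List (String × List String)) (out : List (String × String × Int)) : Decidable (Spec_build_co_preference_matrix talks preferences out) := by unfold Spec_build_co_preference_matrix; infer_instance

-- ===== CLAIM (what is proved, stated in full; the proofs are below) =====
def Claim_equal_build_co_preference_matrix : Prop := ∀ (talks : List String) (preferences : List (String × List String)), Dom_build_co_preference_matrix talks preferences → Spec_build_co_preference_matrix talks preferences (build_co_preference_matrix talks preferences)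

-- ===== LEMMAS AND PROOFS =====

-- canonical ordered pair (definitionally A's and B's inline 'if t < u then (t,u) else (u,t)')
def pvPairOf (t u : String) : String × String := if t < u then (t, u) else (u, t)

-- the flat list of ordered pairs pvBumpPairs inserts
def pvPairs : List String → List (String × String)
  | [] => []
  | x :: r => (x :: r).map (fun y => (x, y)) ++ pvPairs r

lemma pvPairs_fst_mem : ∀ (s : List String) (p : String × String), p ∈ pvPairs s → p.1 ∈ s := by
  intro s
  induction s with
  | nil => intro p h; simp [pvPairs] at h
  | cons x r ih =>
      intro p h
      simp only [pvPairs, List.mem_append, List.mem_map] at h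
      rcases h with ⟨y, _, rfl⟩ | h
      · simp
      · exact List.mem_cons_of_mem _ (ih p h)

lemma pvBumpPairs_getD (s : List String) : ∀ (c : PySem.Dict (String × String) Int) (x y : String),
    (pvBumpPairs s c).getD (x, y) 0 = c.getD (x, y) 0 + ((pvPairs s).count (x, y) : Int) := by
  induction s with
  | nil => intro c x y; simp [pvBumpPairs, pvPairs]
  | cons a r ih =>
      intro c x y
      have hmap : (a :: r).foldl (fun c y => c.insert (a, y) (c.getD (a, y) 0 + 1)) c
          = ((a :: r).map (fun y => (a, y))).foldl (fun c k => c.insert k (c.getD k 0 + 1)) c := by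
        rw [List.foldl_map]
      rw [pvBumpPairs, ih, hmap, PySem.Dict.getD_foldl_insert_add_one]
      simp only [pvPairs, List.count_append]
      push_cast
      ring

lemma pvPairs_count_sorted (s : List String) (hs : s.Pairwise (· < ·)) (x y : String) :
    (pvPairs s).count (x, y) = if x ∈ s ∧ y ∈ s ∧ x ≤ y then 1 else 0 := by
  induction s with
  | nil => simp [pvPairs]
  | cons a r ih =>
      have ha : ∀ b ∈ r, a < b := (List.pairwise_cons.mp hs).1
      have hr : r.Pairwise (· < ·) := hs.of_cons
      have hnd : (a :: r).Nodup := hs.imp (fun h => ne_of_lt h)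
      have hanr : a ∉ r := fun h => absurd (ha a h) (lt_irrefl a)
      rw [pvPairs, List.count_append]
      by_cases hx : x = a
      · subst hx
        have h1 : ((x :: r).map (fun y => (x, y))).count (x, y) = (x :: r).count y :=
          List.count_map_of_injective _ _ (fun u v h => by simpa using h) _
        have h2 : (pvPairs r).count (x, y) = 0 := by
          rw [List.count_eq_zero]
          intro h
          exact hanr (pvPairs_fst_mem r (x, y) h)
        rw [h1, h2]
        by_cases hy : y ∈ x :: r
        · have hxy : x ≤ y := by
            rcases List.mem_cons.mp hy with rfl | hy'
            · exact le_refl _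
            · exact le_of_lt (ha y hy')
          rw [List.count_eq_one_of_mem hnd hy]
          simp [hy, hxy]
        · rw [List.count_eq_zero_of_not_mem hy]
          simp [hy]
      · have h1 : ((a :: r).map (fun y => (a, y))).count (x, y) = 0 := by
          rw [List.count_eq_zero]
          intro h
          rcases List.mem_map.mp h with ⟨z, _, hz⟩
          exact hx (congrArg Prod.fst hz).symm
        rw [h1, ih hr, Nat.zero_add]
        have hxmem : (x ∈ a :: r) ↔ x ∈ r := by simp [List.mem_cons, hx]
        by_cases hy : y = a
        · subst hy
          by_cases hxr : x ∈ r
          · have hnle : ¬ x ≤ y := not_le.mpr (ha x hxr)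
            simp [hnle]
          · simp [hxmem, hxr]
        · have hymem : (y ∈ a :: r) ↔ y ∈ r := by simp [List.mem_cons, hy]
          simp only [hxmem, hymem]

-- one participant's contribution to the counter, at a canonical key
lemma pvCounts_getD (vs : List (List String)) : ∀ (c : PySem.Dict (String × String) Int) (x y : String), x ≤ y →
    (vs.foldl (fun c prefs => pvBumpPairs (PySem.List.sorted (PySem.Set.ofList prefs) (fun z => z) false) c) c).getD (x, y) 0
      = c.getD (x, y) 0 + ((vs.map (fun prefs => if x ∈ prefs ∧ y ∈ prefs then (1 : Int) else 0)).sum) := by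
  induction vs with
  | nil => intro c x y _; simp
  | cons v r ih =>
      intro c x y hxy
      have hsorted : (PySem.List.sorted (PySem.Set.ofList v) (fun z : String => z) false).Pairwise (· < ·) :=
        PySem.List.sorted_ofList_pairwise_lt v
      rw [List.foldl_cons, ih _ _ _ hxy, pvBumpPairs_getD, pvPairs_count_sorted _ hsorted]
      have hmem : ∀ z : String, (z ∈ PySem.List.sorted (PySem.Set.ofList v) (fun z : String => z) false) ↔ z ∈ v := by
        intro z; rw [PySem.List.mem_sorted, PySem.Set.mem_ofList]
      simp only [List.map_cons, List.sum_cons, hmem x, hmem y, hxy, and_true]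
      push_cast
      ring

lemma pvPairOf_le (t u : String) : (pvPairOf t u).1 ≤ (pvPairOf t u).2 := by
  unfold pvPairOf
  by_cases h : t < u
  · simp [h, le_of_lt h]
  · simp [h, le_of_not_gt h]

-- A's per-pair participant scan equals B's counter lookup at the canonical pair
lemma pvVal_eq (d : PySem.Dict String (List String)) (t u : String) :
    compute_co_preference_weight t u d
      = (d.values.foldl
          (fun c prefs => pvBumpPairs (PySem.List.sorted (PySem.Set.ofList prefs) (fun z => z) false) c)
          PySem.Dict.empty).getD (pvPairOf t u) 0 := by
  have hle := pvPairOf_le t u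
  rcases hp : pvPairOf t u with ⟨x, y⟩
  rw [hp] at hle
  simp only at hle
  rw [pvCounts_getD d.values PySem.Dict.empty x y hle, PySem.Dict.getD_empty]
  unfold compute_co_preference_weight
  rw [PySem.List.foldl_ite_add_one (fun pr : String × List String => t ∈ pr.2 ∧ u ∈ pr.2) d.items 0]
  have hvals : d.values = d.items.map (fun pr => pr.2) := rfl
  have hfun : ∀ pr : String × List String,
      (if x ∈ pr.2 ∧ y ∈ pr.2 then (1 : Int) else 0)
        = (if (fun q : String × List String => decide (x ∈ q.2 ∧ y ∈ q.2)) pr = true then 1 else 0) := by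
    intro pr
    by_cases h : x ∈ pr.2 ∧ y ∈ pr.2 <;> simp [h]
  rw [hvals, List.map_map]
  have hmapeq : (d.items.map ((fun prefs => if x ∈ prefs ∧ y ∈ prefs then (1 : Int) else 0) ∘ (fun pr => pr.2)))
      = d.items.map (fun pr => if (fun q : String × List String => decide (x ∈ q.2 ∧ y ∈ q.2)) pr = true then 1 else 0) :=
    List.map_congr_left (fun pr _ => hfun pr)
  rw [hmapeq, PySem.List.sum_map_ite_one_zero]
  have hiff : ∀ prefs : List String, (t ∈ prefs ∧ u ∈ prefs) ↔ (x ∈ prefs ∧ y ∈ prefs) := by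
    intro prefs
    unfold pvPairOf at hp
    by_cases h : t < u
    · rw [if_pos h] at hp
      simp only [Prod.mk.injEq] at hp
      obtain ⟨rfl, rfl⟩ := hp
      exact Iff.rfl
    · rw [if_neg h] at hp
      simp only [Prod.mk.injEq] at hp
      obtain ⟨rfl, rfl⟩ := hp
      exact and_comm
  have hcp : d.items.countP (fun pr => decide (t ∈ pr.2 ∧ u ∈ pr.2))
      = d.items.countP (fun q : String × List String => decide (x ∈ q.2 ∧ y ∈ q.2)) := by
    refine List.countP_congr (fun pr _ => ?_)
    simp [hiff pr.2]
  rw [hcp]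

-- the common suffix-recursion shape of the weights loop
def pvSufRec {W : Type} (g : String → String → W → W) : List String → W → W
  | [], w => w
  | t :: r, w => pvSufRec g r (r.foldl (fun w u => g t u w) w)

lemma pvA_shape {W : Type} (g : String → String → W → W) (ys : List String) :
    ∀ (xs : List String) (k : Nat) (w : W), ys.drop k = xs →
    (PySem.List.enumerate xs (k : Int)).foldl
        (fun w p => (PySem.List.slice ys (some (p.1 + 1)) none).foldl (fun w u => g p.2 u w) w) w
      = pvSufRec g xs w := by
  intro xs
  induction xs with
  | nil => intro k w _; simp [PySem.List.enumerate_nil, pvSufRec]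
  | cons x r ih =>
      intro k w hdrop
      rw [PySem.List.enumerate_cons, List.foldl_cons]
      have hcast : (k : Int) + 1 = ((k + 1 : Nat) : Int) := by push_cast; ring
      have hslice : PySem.List.slice ys (some ((k : Int) + 1)) none = ys.drop (k + 1) := by
        rw [hcast, PySem.List.slice_from_natCast]
      have hdrop' : ys.drop (k + 1) = r := by
        have h1 : ys.drop (k + 1) = (ys.drop k).drop 1 := by rw [List.drop_drop, Nat.add_comm]
        rw [h1, hdrop, List.drop_one, List.tail_cons]
      rw [hslice, hdrop', pvSufRec]
      exact ih (k + 1) _ hdrop'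

-- invariant: unique keys, every stored value is the canonical weight of its key
def pvInv (f : String × String → Int) (w : PySem.Dict (String × String) Int) : Prop :=
  ∀ k v, (k, v) ∈ w.items → v = f k

lemma pvInsert_eq_self (w : PySem.Dict (String × String) Int) (k : String × String) (v : Int)
    (hc : w.contains k = true) (hv : ∀ v', (k, v') ∈ w.items → v' = v) : w.insert k v = w := by
  apply PySem.Dict.ext
  rw [PySem.Dict.items_insert_of_contains w v hc]
  have : ∀ p ∈ w.items, (if (p.1 == k) = true then (k, v) else p) = p := by
    intro p hp
    by_cases h : p.1 = k
    · have hvp : p.2 = v := hv p.2 (by rw [← h]; exact hp)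
      simp only [h, beq_self_eq_true, if_true]
      exact Prod.ext h.symm hvp.symm
    · simp [h]
  rw [List.map_congr_left this]
  exact List.map_id' w.items

lemma pvFold_eq (counts : PySem.Dict (String × String) Int) (vA : String → String → Int)
    (hv : ∀ t u, vA t u = counts.getD (pvPairOf t u) 0) (t : String) :
    ∀ (r : List String) (w : PySem.Dict (String × String) Int), pvInv (fun p => counts.getD p 0) w →
      r.foldl (fun w u => w.insert (pvPairOf t u) (vA t u)) w
        = r.foldl (fun w u => if w.contains (pvPairOf t u) then w
            else w.insert (pvPairOf t u) (counts.getD (pvPairOf t u) 0)) w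
      ∧ pvInv (fun p => counts.getD p 0)
          (r.foldl (fun w u => if w.contains (pvPairOf t u) then w
            else w.insert (pvPairOf t u) (counts.getD (pvPairOf t u) 0)) w) := by
  intro r
  induction r with
  | nil => exact fun w h => ⟨rfl, h⟩
  | cons u r ih =>
      intro w h
      simp only [List.foldl_cons]
      by_cases hc : w.contains (pvPairOf t u) = true
      · have hA : w.insert (pvPairOf t u) (vA t u) = w := by
          refine pvInsert_eq_self w _ _ hc (fun v' hmem => ?_)
          rw [h _ _ hmem, hv]
        rw [hA, if_pos hc]
        exact ih w h
      · have hcf : w.contains (pvPairOf t u) = false := by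
          exact Bool.not_eq_true _ ▸ (by simpa using hc)
        have hinv : pvInv (fun p => counts.getD p 0)
            (w.insert (pvPairOf t u) (counts.getD (pvPairOf t u) 0)) := by
          intro k v hmem
          rw [PySem.Dict.items_insert_of_not_contains w _ hcf] at hmem
          rcases List.mem_append.mp hmem with hmem | hmem
          · exact h _ _ hmem
          · rcases List.mem_singleton.mp hmem with heq
            rw [(Prod.mk.inj heq).1, (Prod.mk.inj heq).2]
        rw [hv t u, if_neg hc]
        exact ih _ hinv

lemma pvSufRec_eq (counts : PySem.Dict (String × String) Int) (vA : String → String → Int)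
    (hv : ∀ t u, vA t u = counts.getD (pvPairOf t u) 0) :
    ∀ (xs : List String) (w : PySem.Dict (String × String) Int), pvInv (fun p => counts.getD p 0) w →
      pvSufRec (fun t u w => w.insert (pvPairOf t u) (vA t u)) xs w = pvWeightsLoop counts xs w
      ∧ pvInv (fun p => counts.getD p 0) (pvWeightsLoop counts xs w) := by
  intro xs
  induction xs with
  | nil => exact fun w h => ⟨rfl, h⟩
  | cons t r ih =>
      intro w h
      rcases pvFold_eq counts vA hv t r w h with ⟨heq, hinv⟩
      rcases ih _ hinv with ⟨ih1, ih2⟩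
      constructor
      · show pvSufRec _ r _ = pvWeightsLoop counts r _
        rw [show (r.foldl (fun w u => (fun t u w => w.insert (pvPairOf t u) (vA t u)) t u w) w)
              = (r.foldl (fun w u => w.insert (pvPairOf t u) (vA t u)) w) from rfl, heq]
        exact ih1
      · exact ih2

-- ===== VERDICT (by name: the statement is the Claim_ definition above) =====
theorem build_co_preference_matrix_spec : Claim_equal_build_co_preference_matrix := by
  intro talks preferences _
  unfold Spec_build_co_preference_matrix
  simp only [build_co_preference_matrix, build_co_preference_matrix_alt]
  set d := PySem.Dict.ofList preferences with hd
  set counts := d.values.foldl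
      (fun c prefs => pvBumpPairs (PySem.List.sorted (PySem.Set.ofList prefs) (fun z => z) false) c)
      PySem.Dict.empty with hcnt
  have hv : ∀ t u : String, compute_co_preference_weight t u d = counts.getD (pvPairOf t u) 0 := by
    intro t u
    rw [pvVal_eq d t u, hcnt]
  have hinv0 : pvInv (fun p => counts.getD p 0) PySem.Dict.empty := by
    intro k v hmem
    simp [PySem.Dict.empty] at hmem
  have hdict : (PySem.List.enumerate talks).foldl
      (fun w p => (PySem.List.slice talks (some (p.1 + 1)) none).foldl
        (fun w talk_j => w.insert (if p.2 < talk_j then (p.2, talk_j) else (talk_j, p.2))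
          (compute_co_preference_weight p.2 talk_j d)) w)
      PySem.Dict.empty = pvWeightsLoop counts talks PySem.Dict.empty := by
    refine Eq.trans
      (pvA_shape (fun t u w => w.insert (pvPairOf t u) (compute_co_preference_weight t u d))
        talks talks 0 PySem.Dict.empty (by simp)) ?_
    exact (pvSufRec_eq counts (fun t u => compute_co_preference_weight t u d) hv talks
      PySem.Dict.empty hinv0).1
  rw [hdict]
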